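-- pv_equiv track=rewrite | github.com/WSm-77/WDI | set6/32.py | solution
-- ===== SOURCE A (Python) =====
-- def solution(T, k, index = 0, set1 = 0, set2 = 0, numberOfUsedElements = 0):
--     if index == len(T):
--         return True if numberOfUsedElements == k and set1 == set2 else False
--     #end if
--
--     currentElement = T[index]
--     if solution(T, k, index + 1, set1, set2, numberOfUsedElements) or \
--        solution(T, k, index + 1, set1 + currentElement, set2, numberOfUsedElements + 1) or \
--        solution(T, k, index + 1, set1, set2 + currentElement, numberOfUsedElements + 1):
--         return True
--     #end if
--
--     return False
-- ===== SOURCE B (Python) =====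
-- def solution(T, k, index=0, set1=0, set2=0, numberOfUsedElements=0):
--     # top-down DP: memoise on (position, set1-set2 difference, used count)
--     n = len(T)
--     memo = {}
--
--     def go(i, d, u):
--         if i == n:
--             return u == k and d == 0
--         key = (i, d, u)
--         if key in memo:
--             return memo[key]
--         x = T[i]
--         res = go(i + 1, d, u) or go(i + 1, d + x, u + 1) or go(i + 1, d - x, u + 1)
--         memo[key] = res
--         return res
--
--     return go(index, set1 - set2, numberOfUsedElements)
-- ===== Notes on version B (the rewrite author's own statement) =====
-- stated objective: alternative
-- what changed: Replaces A's blind ternary recursion on (set1, set2) with top-down dynamic programming: the two running sums are fused into their difference and results are memoised in a dictionary keyed by (position, difference, used count), collapsing repeated subproblems.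
import Mathlib
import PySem

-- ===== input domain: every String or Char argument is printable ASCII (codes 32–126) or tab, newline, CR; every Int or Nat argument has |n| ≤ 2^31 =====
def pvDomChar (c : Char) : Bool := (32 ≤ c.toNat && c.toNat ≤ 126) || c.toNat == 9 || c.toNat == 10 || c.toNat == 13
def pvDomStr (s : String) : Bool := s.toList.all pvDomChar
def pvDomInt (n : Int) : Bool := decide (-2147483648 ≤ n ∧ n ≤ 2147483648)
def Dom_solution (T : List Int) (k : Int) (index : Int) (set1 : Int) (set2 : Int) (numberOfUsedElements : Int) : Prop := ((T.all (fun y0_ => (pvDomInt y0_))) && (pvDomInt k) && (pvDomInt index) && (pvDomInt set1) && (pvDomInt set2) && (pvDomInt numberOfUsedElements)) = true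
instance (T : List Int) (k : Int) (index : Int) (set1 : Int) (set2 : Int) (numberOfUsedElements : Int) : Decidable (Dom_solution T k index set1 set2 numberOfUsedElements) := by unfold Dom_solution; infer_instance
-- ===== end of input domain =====

-- B replaces A's ternary recursion on (set1, set2) by top-down dynamic programming on the
-- fused state (position, set1-set2, used count) with a memo dictionary; objective: alternative.

-- ===== PORT A =====
-- Literal port of A's ternary recursion; where Python's T[index] would raise IndexError
-- (index outside [-len, len)) the port returns false — such inputs are outside Pre_solution.
def solution (T : List Int) (k : Int) (index : Int) (set1 : Int) (set2 : Int) (numberOfUsedElements : Int) : Bool :=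
  if index = (T.length : Int) then
    decide (numberOfUsedElements = k ∧ set1 = set2)
  else
    match h : PySem.List.pyGet? T index with
    | none => false   -- Python raises IndexError here; excluded by Pre_solution
    | some currentElement =>
      solution T k (index + 1) set1 set2 numberOfUsedElements ||
      solution T k (index + 1) (set1 + currentElement) set2 (numberOfUsedElements + 1) ||
      solution T k (index + 1) set1 (set2 + currentElement) (numberOfUsedElements + 1)
termination_by ((T.length : Int) - index).toNat
decreasing_by
  all_goals
    have hin : PySem.Raise.InRange T.length index := by
      by_contra hc
      rw [← PySem.List.pyGet?_eq_none_iff (xs := T)] at hc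
      simp [hc] at h
    rcases hin with ⟨h1, h2⟩
    omega

-- ===== PORT B =====
-- Source B's inner 'go': memoised recursion; the pair threads the memo dict through the
-- short-circuited 'or' chain exactly as Python evaluates it.
def solutionAltGo (T : List Int) (n : Int) (k : Int) (i : Int) (d : Int) (u : Int)
    (memo : PySem.Dict (Int × Int × Int) Bool) : Bool × PySem.Dict (Int × Int × Int) Bool :=
  if i = n then (decide (u = k ∧ d = 0), memo)
  else
    match memo.get? (i, d, u) with
    | some b => (b, memo)
    | none =>
      match h : PySem.List.pyGet? T i with
      | none => (false, memo)   -- Python raises IndexError here; excluded by Pre_solution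
      | some x =>
        let r1 := solutionAltGo T n k (i + 1) d u memo
        if r1.1 then (true, r1.2.insert (i, d, u) true)
        else
          let r2 := solutionAltGo T n k (i + 1) (d + x) (u + 1) r1.2
          if r2.1 then (true, r2.2.insert (i, d, u) true)
          else
            let r3 := solutionAltGo T n k (i + 1) (d - x) (u + 1) r2.2
            (r3.1, r3.2.insert (i, d, u) r3.1)
termination_by ((T.length : Int) - i).toNat
decreasing_by
  all_goals
    have hin : PySem.Raise.InRange T.length i := by
      by_contra hc
      rw [← PySem.List.pyGet?_eq_none_iff (xs := T)] at hc
      simp [hc] at h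
    rcases hin with ⟨h1, h2⟩
    omega

def solution_alt (T : List Int) (k : Int) (index : Int) (set1 : Int) (set2 : Int) (numberOfUsedElements : Int) : Bool :=
  (solutionAltGo T (T.length : Int) k index (set1 - set2) numberOfUsedElements PySem.Dict.empty).1

-- ===== PRECONDITION & SPEC =====
-- Pre_ admits exactly the inputs on which Python A returns: outside -len(T) ≤ index ≤ len(T)
-- the first access T[index] raises IndexError.
def Pre_solution (T : List Int) (k : Int) (index : Int) (set1 : Int) (set2 : Int) (numberOfUsedElements : Int) : Prop :=
  -(T.length : Int) ≤ index ∧ index ≤ (T.length : Int)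
instance (T : List Int) (k : Int) (index : Int) (set1 : Int) (set2 : Int) (numberOfUsedElements : Int) : Decidable (Pre_solution T k index set1 set2 numberOfUsedElements) := by unfold Pre_solution; infer_instance

def pvWitness_solution : List Int × Int × Int × Int × Int × Int := ([1, 2, 3], 2, 0, 0, 0, 0)

def Spec_solution (T : List Int) (k : Int) (index : Int) (set1 : Int) (set2 : Int) (numberOfUsedElements : Int) (out : Bool) : Prop := out = solution_alt T k index set1 set2 numberOfUsedElements
instance (T : List Int) (k : Int) (index : Int) (set1 : Int) (set2 : Int) (numberOfUsedElements : Int) (out : Bool) : Decidable (Spec_solution T k index set1 set2 numberOfUsedElements out) := by unfold Spec_solution; infer_instance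

-- ===== CLAIM (what is proved, stated in full; the proofs are below) =====
def Claim_equal_solution : Prop := ∀ (T : List Int) (k : Int) (index : Int) (set1 : Int) (set2 : Int) (numberOfUsedElements : Int), Dom_solution T k index set1 set2 numberOfUsedElements → Pre_solution T k index set1 set2 numberOfUsedElements → Spec_solution T k index set1 set2 numberOfUsedElements (solution T k index set1 set2 numberOfUsedElements)

-- ===== LEMMAS AND PROOFS =====

-- A's recursion with the two sums fused into their difference (the reference function both
-- ports are reduced to)
def gA (T : List Int) (k : Int) (i : Int) (d : Int) (u : Int) : Bool :=
  if i = (T.length : Int) then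
    decide (u = k ∧ d = 0)
  else
    match h : PySem.List.pyGet? T i with
    | none => false
    | some x =>
      gA T k (i + 1) d u || gA T k (i + 1) (d + x) (u + 1) || gA T k (i + 1) (d - x) (u + 1)
termination_by ((T.length : Int) - i).toNat
decreasing_by
  all_goals
    have hin : PySem.Raise.InRange T.length i := by
      by_contra hc
      rw [← PySem.List.pyGet?_eq_none_iff (xs := T)] at hc
      simp [hc] at h
    rcases hin with ⟨h1, h2⟩
    omega

-- equation lemmas that dissolve the dependent matches of the three recursions
theorem solution_eq_none (T : List Int) (k i s1 s2 u : Int)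
    (hix : ¬ i = (T.length : Int)) (heq : PySem.List.pyGet? T i = none) :
    solution T k i s1 s2 u = false := by
  rw [solution, if_neg hix]
  split
  · rfl
  · rename_i x h2; rw [heq] at h2; cases h2

theorem solution_eq_some (T : List Int) (k i s1 s2 u x : Int)
    (hix : ¬ i = (T.length : Int)) (heq : PySem.List.pyGet? T i = some x) :
    solution T k i s1 s2 u =
      (solution T k (i + 1) s1 s2 u || solution T k (i + 1) (s1 + x) s2 (u + 1) ||
        solution T k (i + 1) s1 (s2 + x) (u + 1)) := by
  rw [solution, if_neg hix]
  split
  · rename_i h2; rw [heq] at h2; cases h2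
  · rename_i y h2; rw [heq] at h2; injection h2 with hy; subst hy; rfl

theorem gA_eq_none (T : List Int) (k i d u : Int)
    (hix : ¬ i = (T.length : Int)) (heq : PySem.List.pyGet? T i = none) :
    gA T k i d u = false := by
  rw [gA, if_neg hix]
  split
  · rfl
  · rename_i x h2; rw [heq] at h2; cases h2

theorem gA_eq_some (T : List Int) (k i d u x : Int)
    (hix : ¬ i = (T.length : Int)) (heq : PySem.List.pyGet? T i = some x) :
    gA T k i d u =
      (gA T k (i + 1) d u || gA T k (i + 1) (d + x) (u + 1) || gA T k (i + 1) (d - x) (u + 1)) := by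
  rw [gA, if_neg hix]
  split
  · rename_i h2; rw [heq] at h2; cases h2
  · rename_i y h2; rw [heq] at h2; injection h2 with hy; subst hy; rfl

theorem go_eq_hit (T : List Int) (k i d u : Int) (memo : PySem.Dict (Int × Int × Int) Bool)
    (b : Bool) (hix : ¬ i = (T.length : Int)) (hget : memo.get? (i, d, u) = some b) :
    solutionAltGo T (T.length : Int) k i d u memo = (b, memo) := by
  rw [solutionAltGo, if_neg hix, hget]

theorem go_eq_none (T : List Int) (k i d u : Int) (memo : PySem.Dict (Int × Int × Int) Bool)
    (hix : ¬ i = (T.length : Int)) (hget : memo.get? (i, d, u) = none)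
    (heq : PySem.List.pyGet? T i = none) :
    solutionAltGo T (T.length : Int) k i d u memo = (false, memo) := by
  rw [solutionAltGo, if_neg hix, hget]
  split
  · rename_i b2 hb; cases hb
  · split
    · rfl
    · rename_i x2 h2; rw [heq] at h2; cases h2

theorem go_eq_some (T : List Int) (k i d u x : Int) (memo : PySem.Dict (Int × Int × Int) Bool)
    (hix : ¬ i = (T.length : Int)) (hget : memo.get? (i, d, u) = none)
    (heq : PySem.List.pyGet? T i = some x) :
    solutionAltGo T (T.length : Int) k i d u memo =
      (if (solutionAltGo T (T.length : Int) k (i + 1) d u memo).1 then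
        (true, (solutionAltGo T (T.length : Int) k (i + 1) d u memo).2.insert (i, d, u) true)
      else if (solutionAltGo T (T.length : Int) k (i + 1) (d + x) (u + 1)
          (solutionAltGo T (T.length : Int) k (i + 1) d u memo).2).1 then
        (true, (solutionAltGo T (T.length : Int) k (i + 1) (d + x) (u + 1)
          (solutionAltGo T (T.length : Int) k (i + 1) d u memo).2).2.insert (i, d, u) true)
      else
        ((solutionAltGo T (T.length : Int) k (i + 1) (d - x) (u + 1)
            (solutionAltGo T (T.length : Int) k (i + 1) (d + x) (u + 1)
              (solutionAltGo T (T.length : Int) k (i + 1) d u memo).2).2).1,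
         (solutionAltGo T (T.length : Int) k (i + 1) (d - x) (u + 1)
            (solutionAltGo T (T.length : Int) k (i + 1) (d + x) (u + 1)
              (solutionAltGo T (T.length : Int) k (i + 1) d u memo).2).2).2.insert (i, d, u)
           (solutionAltGo T (T.length : Int) k (i + 1) (d - x) (u + 1)
            (solutionAltGo T (T.length : Int) k (i + 1) (d + x) (u + 1)
              (solutionAltGo T (T.length : Int) k (i + 1) d u memo).2).2).1)) := by
  rw [solutionAltGo, if_neg hix, hget]
  split
  · rename_i b2 hb; cases hb
  · split
    · rename_i h2; rw [heq] at h2; cases h2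
    · rename_i y h2; rw [heq] at h2; injection h2 with hy; subst hy; rfl

theorem pyGet?_none_of_ge (T : List Int) (i : Int)
    (hge : (T.length : Int) ≤ i) (hix : ¬ i = (T.length : Int)) :
    PySem.List.pyGet? T i = none := by
  rw [PySem.List.pyGet?_eq_none_iff]
  rintro ⟨_, h2⟩; omega

-- A only depends on set1 - set2
theorem solution_eq_gA (T : List Int) (k : Int) :
    ∀ (m : Nat) (i s1 s2 u : Int), ((T.length : Int) - i).toNat ≤ m →
      solution T k i s1 s2 u = gA T k i (s1 - s2) u := by
  intro m
  induction m with
  | zero =>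
    intro i s1 s2 u hm
    have hge : (T.length : Int) ≤ i := by omega
    by_cases hix : i = (T.length : Int)
    · rw [solution, gA, if_pos hix, if_pos hix]
      simp only [decide_eq_decide]
      omega
    · rw [solution_eq_none T k i s1 s2 u hix (pyGet?_none_of_ge T i hge hix),
          gA_eq_none T k i (s1 - s2) u hix (pyGet?_none_of_ge T i hge hix)]
  | succ m ih =>
    intro i s1 s2 u hm
    by_cases hix : i = (T.length : Int)
    · rw [solution, gA, if_pos hix, if_pos hix]
      simp only [decide_eq_decide]
      omega
    · cases heq : PySem.List.pyGet? T i with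
      | none =>
        rw [solution_eq_none T k i s1 s2 u hix heq, gA_eq_none T k i (s1 - s2) u hix heq]
      | some x =>
        have hin : PySem.Raise.InRange T.length i := by
          by_contra hc
          rw [← PySem.List.pyGet?_eq_none_iff (xs := T)] at hc
          simp [hc] at heq
        rcases hin with ⟨hl1, hl2⟩
        have hm2 : ((T.length : Int) - (i + 1)).toNat ≤ m := by omega
        rw [solution_eq_some T k i s1 s2 u x hix heq,
            gA_eq_some T k i (s1 - s2) u x hix heq,
            ih (i + 1) s1 s2 u hm2,
            ih (i + 1) (s1 + x) s2 (u + 1) hm2,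
            ih (i + 1) s1 (s2 + x) (u + 1) hm2]
        have e1 : s1 + x - s2 = s1 - s2 + x := by ring
        have e2 : s1 - (s2 + x) = s1 - s2 - x := by ring
        rw [e1, e2]

-- the memo table only ever holds correct values of gA
def MemoOK (T : List Int) (k : Int) (memo : PySem.Dict (Int × Int × Int) Bool) : Prop :=
  ∀ (i d u : Int) (b : Bool), memo.get? (i, d, u) = some b → b = gA T k i d u

theorem memoOK_insert (T : List Int) (k : Int) (memo : PySem.Dict (Int × Int × Int) Bool)
    (i d u : Int) (b : Bool) (hm : MemoOK T k memo) (hb : b = gA T k i d u) :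
    MemoOK T k (memo.insert (i, d, u) b) := by
  intro i2 d2 u2 b2 hget
  rw [PySem.Dict.get?_insert] at hget
  split at hget
  · rename_i hkey
    cases hget
    have hi : i2 = i := congrArg Prod.fst hkey
    have hd : d2 = d := congrArg (fun p => p.2.1) hkey
    have hu : u2 = u := congrArg (fun p => p.2.2) hkey
    subst hi; subst hd; subst hu
    exact hb
  · exact hm i2 d2 u2 b2 hget

theorem solutionAltGo_eq_gA (T : List Int) (k : Int) :
    ∀ (m : Nat) (i d u : Int) (memo : PySem.Dict (Int × Int × Int) Bool),
      ((T.length : Int) - i).toNat ≤ m → MemoOK T k memo →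
      (solutionAltGo T (T.length : Int) k i d u memo).1 = gA T k i d u ∧
        MemoOK T k (solutionAltGo T (T.length : Int) k i d u memo).2 := by
  intro m
  induction m with
  | zero =>
    intro i d u memo hm hok
    have hge : (T.length : Int) ≤ i := by omega
    by_cases hix : i = (T.length : Int)
    · rw [solutionAltGo, gA, if_pos hix, if_pos hix]
      exact ⟨rfl, hok⟩
    · cases hget : memo.get? (i, d, u) with
      | some b =>
        rw [go_eq_hit T k i d u memo b hix hget]
        exact ⟨hok i d u b hget, hok⟩
      | none =>
        rw [go_eq_none T k i d u memo hix hget (pyGet?_none_of_ge T i hge hix),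
            gA_eq_none T k i d u hix (pyGet?_none_of_ge T i hge hix)]
        exact ⟨rfl, hok⟩
  | succ m ih =>
    intro i d u memo hm hok
    by_cases hix : i = (T.length : Int)
    · rw [solutionAltGo, gA, if_pos hix, if_pos hix]
      exact ⟨rfl, hok⟩
    · cases hget : memo.get? (i, d, u) with
      | some b =>
        rw [go_eq_hit T k i d u memo b hix hget]
        exact ⟨hok i d u b hget, hok⟩
      | none =>
        cases heq : PySem.List.pyGet? T i with
        | none =>
          rw [go_eq_none T k i d u memo hix hget heq, gA_eq_none T k i d u hix heq]
          exact ⟨rfl, hok⟩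
        | some x =>
          have hin : PySem.Raise.InRange T.length i := by
            by_contra hc
            rw [← PySem.List.pyGet?_eq_none_iff (xs := T)] at hc
            simp [hc] at heq
          rcases hin with ⟨hl1, hl2⟩
          have hm2 : ((T.length : Int) - (i + 1)).toNat ≤ m := by omega
          rw [go_eq_some T k i d u x memo hix hget heq]
          obtain ⟨e1, inv1⟩ := ih (i + 1) d u memo hm2 hok
          by_cases hb1 : (solutionAltGo T (T.length : Int) k (i + 1) d u memo).1 = true
          · rw [if_pos hb1]
            have hg : gA T k i d u = true := by
              rw [gA_eq_some T k i d u x hix heq, ← e1, hb1, Bool.true_or, Bool.true_or]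
            exact ⟨hg.symm, memoOK_insert T k _ i d u true inv1 hg.symm⟩
          · rw [if_neg hb1]
            have hf1 : (solutionAltGo T (T.length : Int) k (i + 1) d u memo).1 = false := by
              cases hr : (solutionAltGo T (T.length : Int) k (i + 1) d u memo).1
              · rfl
              · exact absurd hr hb1
            have hg1 : gA T k (i + 1) d u = false := e1.symm.trans hf1
            obtain ⟨e2, inv2⟩ := ih (i + 1) (d + x) (u + 1) _ hm2 inv1
            by_cases hb2 : (solutionAltGo T (T.length : Int) k (i + 1) (d + x) (u + 1)
                (solutionAltGo T (T.length : Int) k (i + 1) d u memo).2).1 = true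
            · rw [if_pos hb2]
              have hg : gA T k i d u = true := by
                rw [gA_eq_some T k i d u x hix heq, ← e2, hb2, Bool.or_true, Bool.true_or]
              exact ⟨hg.symm, memoOK_insert T k _ i d u true inv2 hg.symm⟩
            · rw [if_neg hb2]
              have hf2 : (solutionAltGo T (T.length : Int) k (i + 1) (d + x) (u + 1)
                  (solutionAltGo T (T.length : Int) k (i + 1) d u memo).2).1 = false := by
                cases hr : (solutionAltGo T (T.length : Int) k (i + 1) (d + x) (u + 1)
                    (solutionAltGo T (T.length : Int) k (i + 1) d u memo).2).1
                · rfl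
                · exact absurd hr hb2
              have hg2 : gA T k (i + 1) (d + x) (u + 1) = false := e2.symm.trans hf2
              obtain ⟨e3, inv3⟩ := ih (i + 1) (d - x) (u + 1) _ hm2 inv2
              have hval : gA T k i d u
                  = (solutionAltGo T (T.length : Int) k (i + 1) (d - x) (u + 1)
                      (solutionAltGo T (T.length : Int) k (i + 1) (d + x) (u + 1)
                        (solutionAltGo T (T.length : Int) k (i + 1) d u memo).2).2).1 := by
                rw [gA_eq_some T k i d u x hix heq, hg1, hg2, Bool.false_or, Bool.false_or]
                exact e3.symm
              exact ⟨hval.symm, memoOK_insert T k _ i d u _ inv3 hval.symm⟩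

-- ===== VERDICT (by name: the statement is the Claim_ definition above) =====
theorem solution_spec : Claim_equal_solution := by
  intro T k index set1 set2 u _ _
  unfold Spec_solution solution_alt
  rw [solution_eq_gA T k ((T.length : Int) - index).toNat index set1 set2 u le_rfl]
  have hempty : MemoOK T k PySem.Dict.empty := by
    intro i d u2 b hget
    rw [PySem.Dict.get?_empty] at hget
    cases hget
  exact ((solutionAltGo_eq_gA T k ((T.length : Int) - index).toNat index (set1 - set2) u
    PySem.Dict.empty le_rfl hempty).1).symm
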